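-- pv_equiv track=rewrite | github.com/SangamNirala/lawyer | focused_repository_expansion.py | _classify_legal_domain
-- ===== SOURCE A (Python) =====
-- def _classify_legal_domain(content: str) -> str:
--     """Classify legal domain based on content"""
--     content_lower = content.lower()
--
--     if any(term in content_lower for term in ['contract', 'agreement', 'breach']):
--         return 'contract_law'
--     elif any(term in content_lower for term in ['constitutional', 'amendment', 'due process']):
--         return 'constitutional_law'
--     elif any(term in content_lower for term in ['employment', 'labor', 'workplace']):
--         return 'employment_law'
--     elif any(term in content_lower for term in ['patent', 'trademark', 'copyright']):
--         return 'intellectual_property'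
--     elif any(term in content_lower for term in ['criminal', 'prosecution', 'defendant']):
--         return 'criminal_law'
--     else:
--         return 'general_law'
-- ===== SOURCE B (Python) =====
-- # Flat keyword->priority index, single min-reduction pass (no elif chain, no per-group any()).
-- TERM_PRIORITY = [
--     ('contract', 0), ('agreement', 0), ('breach', 0),
--     ('constitutional', 1), ('amendment', 1), ('due process', 1),
--     ('employment', 2), ('labor', 2), ('workplace', 2),
--     ('patent', 3), ('trademark', 3), ('copyright', 3),
--     ('criminal', 4), ('prosecution', 4), ('defendant', 4),
-- ]
-- NAMES = ['contract_law', 'constitutional_law', 'employment_law',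
--          'intellectual_property', 'criminal_law', 'general_law']
--
-- def _classify_legal_domain(content: str) -> str:
--     """Classify legal domain: minimum priority over all matching keywords."""
--     content_lower = content.lower()
--     best = 5
--     for term, pri in TERM_PRIORITY:
--         if pri < best and term in content_lower:
--             best = pri
--     return NAMES[best]
-- ===== Notes on version B (the rewrite author's own statement) =====
-- stated objective: alternative
-- what changed: Replaces the early-return elif chain of per-group any() tests by a single min-reduction pass over a flat keyword-to-priority index, returning the name at the smallest matched priority.
import Mathlib
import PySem

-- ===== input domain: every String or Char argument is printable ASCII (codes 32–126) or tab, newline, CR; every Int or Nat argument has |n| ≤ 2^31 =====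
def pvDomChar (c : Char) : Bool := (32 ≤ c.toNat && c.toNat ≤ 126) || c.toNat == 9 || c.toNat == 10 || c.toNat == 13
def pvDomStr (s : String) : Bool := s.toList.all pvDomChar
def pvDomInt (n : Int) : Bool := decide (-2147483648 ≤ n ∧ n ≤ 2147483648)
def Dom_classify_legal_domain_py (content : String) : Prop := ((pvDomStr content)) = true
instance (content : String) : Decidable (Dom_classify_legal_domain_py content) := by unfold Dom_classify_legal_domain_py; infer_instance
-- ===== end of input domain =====

-- B replaces the early-return elif chain by a single min-priority fold over a flat keyword index; same cost, different decomposition.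
-- ===== PORT A =====
def classify_legal_domain_py (content : String) : String :=
  let content_lower := PySem.Str.lower content
  if (["contract", "agreement", "breach"].any fun term => PySem.Str.isIn term content_lower) then
    "contract_law"
  else if (["constitutional", "amendment", "due process"].any fun term => PySem.Str.isIn term content_lower) then
    "constitutional_law"
  else if (["employment", "labor", "workplace"].any fun term => PySem.Str.isIn term content_lower) then
    "employment_law"
  else if (["patent", "trademark", "copyright"].any fun term => PySem.Str.isIn term content_lower) then
    "intellectual_property"
  else if (["criminal", "prosecution", "defendant"].any fun term => PySem.Str.isIn term content_lower) then
    "criminal_law"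
  else
    "general_law"

-- ===== PORT B =====
def termPriorityB : List (String × Nat) :=
  [("contract", 0), ("agreement", 0), ("breach", 0),
   ("constitutional", 1), ("amendment", 1), ("due process", 1),
   ("employment", 2), ("labor", 2), ("workplace", 2),
   ("patent", 3), ("trademark", 3), ("copyright", 3),
   ("criminal", 4), ("prosecution", 4), ("defendant", 4)]

def namesB : List String :=
  ["contract_law", "constitutional_law", "employment_law",
   "intellectual_property", "criminal_law", "general_law"]

def classify_legal_domain_py_alt (content : String) : String :=
  let content_lower := PySem.Str.lower content
  let best := termPriorityB.foldl
    (fun best tp => if tp.2 < best && PySem.Str.isIn tp.1 content_lower then tp.2 else best) 5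
  namesB.getD best "general_law"

-- ===== PRECONDITION & SPEC =====
def Spec_classify_legal_domain_py (content : String) (out : String) : Prop := out = classify_legal_domain_py_alt content
instance (content : String) (out : String) : Decidable (Spec_classify_legal_domain_py content out) := by unfold Spec_classify_legal_domain_py; infer_instance

-- ===== CLAIM (what is proved, stated in full; the proofs are below) =====
def Claim_equal_classify_legal_domain_py : Prop := ∀ (content : String), Dom_classify_legal_domain_py content → Spec_classify_legal_domain_py content (classify_legal_domain_py content)

-- ===== LEMMAS AND PROOFS =====

-- Both sides reduce to the 15 'isIn term content_lower' tests; casing on them in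
-- priority order prunes: once a keyword matches, both sides close by simp.
theorem classify_eq (content : String) :
    classify_legal_domain_py content = classify_legal_domain_py_alt content := by
  by_cases h1 : PySem.Chars.isIn ['c', 'o', 'n', 't', 'r', 'a', 'c', 't'] (PySem.Chars.lower content.toList) = true
  · simp [classify_legal_domain_py, classify_legal_domain_py_alt, termPriorityB, namesB, h1]
  by_cases h2 : PySem.Chars.isIn ['a', 'g', 'r', 'e', 'e', 'm', 'e', 'n', 't'] (PySem.Chars.lower content.toList) = true
  · simp [classify_legal_domain_py, classify_legal_domain_py_alt, termPriorityB, namesB, h1, h2]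
  by_cases h3 : PySem.Chars.isIn ['b', 'r', 'e', 'a', 'c', 'h'] (PySem.Chars.lower content.toList) = true
  · simp [classify_legal_domain_py, classify_legal_domain_py_alt, termPriorityB, namesB, h1, h2, h3]
  by_cases h4 : PySem.Chars.isIn ['c', 'o', 'n', 's', 't', 'i', 't', 'u', 't', 'i', 'o', 'n', 'a', 'l'] (PySem.Chars.lower content.toList) = true
  · simp [classify_legal_domain_py, classify_legal_domain_py_alt, termPriorityB, namesB, h1, h2, h3, h4]
  by_cases h5 : PySem.Chars.isIn ['a', 'm', 'e', 'n', 'd', 'm', 'e', 'n', 't'] (PySem.Chars.lower content.toList) = true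
  · simp [classify_legal_domain_py, classify_legal_domain_py_alt, termPriorityB, namesB, h1, h2, h3, h4, h5]
  by_cases h6 : PySem.Chars.isIn ['d', 'u', 'e', ' ', 'p', 'r', 'o', 'c', 'e', 's', 's'] (PySem.Chars.lower content.toList) = true
  · simp [classify_legal_domain_py, classify_legal_domain_py_alt, termPriorityB, namesB, h1, h2, h3, h4, h5, h6]
  by_cases h7 : PySem.Chars.isIn ['e', 'm', 'p', 'l', 'o', 'y', 'm', 'e', 'n', 't'] (PySem.Chars.lower content.toList) = true
  · simp [classify_legal_domain_py, classify_legal_domain_py_alt, termPriorityB, namesB, h1, h2, h3, h4, h5, h6, h7]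
  by_cases h8 : PySem.Chars.isIn ['l', 'a', 'b', 'o', 'r'] (PySem.Chars.lower content.toList) = true
  · simp [classify_legal_domain_py, classify_legal_domain_py_alt, termPriorityB, namesB, h1, h2, h3, h4, h5, h6, h7, h8]
  by_cases h9 : PySem.Chars.isIn ['w', 'o', 'r', 'k', 'p', 'l', 'a', 'c', 'e'] (PySem.Chars.lower content.toList) = true
  · simp [classify_legal_domain_py, classify_legal_domain_py_alt, termPriorityB, namesB, h1, h2, h3, h4, h5, h6, h7, h8, h9]
  by_cases h10 : PySem.Chars.isIn ['p', 'a', 't', 'e', 'n', 't'] (PySem.Chars.lower content.toList) = true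
  · simp [classify_legal_domain_py, classify_legal_domain_py_alt, termPriorityB, namesB, h1, h2, h3, h4, h5, h6, h7, h8, h9, h10]
  by_cases h11 : PySem.Chars.isIn ['t', 'r', 'a', 'd', 'e', 'm', 'a', 'r', 'k'] (PySem.Chars.lower content.toList) = true
  · simp [classify_legal_domain_py, classify_legal_domain_py_alt, termPriorityB, namesB, h1, h2, h3, h4, h5, h6, h7, h8, h9, h10, h11]
  by_cases h12 : PySem.Chars.isIn ['c', 'o', 'p', 'y', 'r', 'i', 'g', 'h', 't'] (PySem.Chars.lower content.toList) = true
  · simp [classify_legal_domain_py, classify_legal_domain_py_alt, termPriorityB, namesB, h1, h2, h3, h4, h5, h6, h7, h8, h9, h10, h11, h12]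
  by_cases h13 : PySem.Chars.isIn ['c', 'r', 'i', 'm', 'i', 'n', 'a', 'l'] (PySem.Chars.lower content.toList) = true
  · simp [classify_legal_domain_py, classify_legal_domain_py_alt, termPriorityB, namesB, h1, h2, h3, h4, h5, h6, h7, h8, h9, h10, h11, h12, h13]
  by_cases h14 : PySem.Chars.isIn ['p', 'r', 'o', 's', 'e', 'c', 'u', 't', 'i', 'o', 'n'] (PySem.Chars.lower content.toList) = true
  · simp [classify_legal_domain_py, classify_legal_domain_py_alt, termPriorityB, namesB, h1, h2, h3, h4, h5, h6, h7, h8, h9, h10, h11, h12, h13, h14]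
  by_cases h15 : PySem.Chars.isIn ['d', 'e', 'f', 'e', 'n', 'd', 'a', 'n', 't'] (PySem.Chars.lower content.toList) = true
  · simp [classify_legal_domain_py, classify_legal_domain_py_alt, termPriorityB, namesB, h1, h2, h3, h4, h5, h6, h7, h8, h9, h10, h11, h12, h13, h14, h15]
  simp [classify_legal_domain_py, classify_legal_domain_py_alt, termPriorityB, namesB, h1, h2, h3, h4, h5, h6, h7, h8, h9, h10, h11, h12, h13, h14, h15]

-- ===== VERDICT (by name: the statement is the Claim_ definition above) =====
theorem classify_legal_domain_py_spec : Claim_equal_classify_legal_domain_py := by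
  intro content _
  exact classify_eq content
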